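-- pv_equiv track=rewrite | github.com/981377660LMT/algorithm-study | 22_专题/公式变形/相等的对-公式变形.py | solve
-- ===== SOURCE A (Python) =====
-- from collections import Counter
--
-- MOD = int(1e9) + 7
--
-- def solve(nums):
--     count = Counter()
--     res = 0
--
--     for x in nums:
--         x -= int(str(x)[::-1])
--         count[x] += 1
--         res += count[x]
--
--     return res % MOD
-- ===== SOURCE B (Python) =====
-- from collections import Counter
--
-- MOD = int(1e9) + 7
--
-- def solve(nums):
--     counts = Counter(x - int(str(x)[::-1]) for x in nums)
--     res = 0
--     for m in counts.values():
--         res += m * (m + 1) // 2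
--     return res % MOD
-- ===== Notes on version B (the rewrite author's own statement) =====
-- stated objective: simpler
-- what changed: A accumulates the pair count incrementally (res += running multiplicity after each element); B tabulates the full frequency table of x - reverse(x) in one pass and then sums the closed-form triangular number m*(m+1)//2 per group.
import Mathlib
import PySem

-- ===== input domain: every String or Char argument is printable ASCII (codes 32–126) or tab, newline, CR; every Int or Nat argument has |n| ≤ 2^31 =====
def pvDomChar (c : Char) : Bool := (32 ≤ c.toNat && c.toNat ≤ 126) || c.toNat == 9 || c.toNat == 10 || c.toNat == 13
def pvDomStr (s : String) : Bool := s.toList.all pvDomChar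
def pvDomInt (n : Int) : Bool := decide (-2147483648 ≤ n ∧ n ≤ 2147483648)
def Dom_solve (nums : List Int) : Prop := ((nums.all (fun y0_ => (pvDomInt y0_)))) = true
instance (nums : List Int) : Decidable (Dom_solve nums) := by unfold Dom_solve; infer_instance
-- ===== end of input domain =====

-- B replaces A's incremental "add the running multiplicity at each step" accumulation by
-- building the full frequency table of x - reverse(x) first and then summing the
-- closed-form triangular number m*(m+1)//2 per group (simpler decomposition, same cost).


def pvMOD : Int := 1000000007

-- x - int(str(x)[::-1]), the expression both Pythons compute per element.
-- s[::-1] on a string is exactly the reverse of its character list; int(...) = ofChars?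
-- (none = ValueError, which Python A/B raise for negative x).
def pyKey? (x : Int) : Option Int :=
  (PySem.Int.ofChars? ((PySem.Int.toChars x).reverse)).map (fun r => x - r)

-- ===== PORT A =====
-- one iteration of A's loop: count[x] += 1; res += count[x]; none propagates a ValueError
def solveStep (st : Option (PySem.Dict Int Int × Int)) (x : Int) :
    Option (PySem.Dict Int Int × Int) :=
  st.bind (fun dr =>
    (pyKey? x).map (fun k =>
      let d' := dr.1.modify k 0 (· + 1)
      (d', dr.2 + d'.getD k 0)))

def solve (nums : List Int) : Int :=
  match nums.foldl solveStep (some (PySem.Dict.empty, 0)) with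
  | some (_, res) => PySem.Int.mod res pvMOD
  | none => 0   -- ValueError path (some x < 0); excluded by Pre_solve

-- ===== PORT B =====
def solve_alt (nums : List Int) : Int :=
  match nums.mapM pyKey? with   -- the generator inside Counter(...); none = ValueError
  | none => 0
  | some ks =>
    let counts := PySem.Dict.counter ks
    PySem.Int.mod
      (counts.values.foldl (fun res m => res + PySem.Int.floordiv (m * (m + 1)) 2) 0)
      pvMOD

-- ===== PRECONDITION & SPEC =====
-- Python raises ValueError on int(str(x)[::-1]) whenever x < 0 ("5-"): exclude negatives.
def Pre_solve (nums : List Int) : Prop := ∀ x ∈ nums, 0 ≤ x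
instance (nums : List Int) : Decidable (Pre_solve nums) := by unfold Pre_solve; infer_instance
def pvWitness_solve : List Int := [10, 1, 12, 21, 0]

def Spec_solve (nums : List Int) (out : Int) : Prop := out = solve_alt nums
instance (nums : List Int) (out : Int) : Decidable (Spec_solve nums out) := by unfold Spec_solve; infer_instance

-- ===== CLAIM (what is proved, stated in full; the proofs are below) =====
def Claim_equal_solve : Prop := ∀ (nums : List Int), Dom_solve nums → Pre_solve nums → Spec_solve nums (solve nums)

-- ===== LEMMAS AND PROOFS =====

-- Sum of m*(m+1)//2 over the distinct keys' multiplicities: what B's second pass computes.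
def triSum (ks : List Int) : Int :=
  ((PySem.Set.ofList ks).map
    (fun k => PySem.Int.floordiv (((ks.count k : Int)) * ((ks.count k : Int) + 1)) 2)).sum

theorem tri_succ (c : Int) :
    PySem.Int.floordiv ((c + 1) * (c + 2)) 2 = PySem.Int.floordiv (c * (c + 1)) 2 + (c + 1) := by
  obtain ⟨t, ht⟩ := Int.even_mul_succ_self c
  have h1 : c * (c + 1) = 2 * t := by linarith
  have h2 : (c + 1) * (c + 2) = 2 * (t + (c + 1)) := by linear_combination h1
  rw [PySem.Int.floordiv_eq_ediv_of_pos (by norm_num),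
      PySem.Int.floordiv_eq_ediv_of_pos (by norm_num), h1, h2,
      Int.mul_ediv_cancel_left _ (by norm_num), Int.mul_ediv_cancel_left _ (by norm_num)]

theorem sum_map_update {L : List Int} {g g' : Int → Int} {k : Int}
    (hkL : k ∈ L) (hnd : L.Nodup) (hg : ∀ j ∈ L, j ≠ k → g' j = g j) :
    (L.map g').sum = (L.map g).sum + (g' k - g k) := by
  induction L with
  | nil => cases hkL
  | cons a L ih =>
    rw [List.map_cons, List.map_cons, List.sum_cons, List.sum_cons]
    rcases List.mem_cons.mp hkL with rfl | hk
    · have hall : ∀ j ∈ L, g' j = g j := fun j hj =>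
        hg j (List.mem_cons_of_mem _ hj) (fun h => (List.nodup_cons.mp hnd).1 (h ▸ hj))
      rw [List.map_congr_left hall]
      omega
    · have hih := ih hk (List.nodup_cons.mp hnd).2
        (fun j hj hne => hg j (List.mem_cons_of_mem _ hj) hne)
      have ha : g' a = g a :=
        hg a List.mem_cons_self (fun h => (List.nodup_cons.mp hnd).1 (h ▸ hk))
      rw [hih, ha]; omega

theorem triSum_append (ks : List Int) (k : Int) :
    triSum (ks ++ [k]) = triSum ks + ((ks.count k : Int) + 1) := by
  have hcnt : ∀ j : Int, (ks ++ [k]).count j = ks.count j + (if j = k then 1 else 0) := by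
    intro j; rw [List.count_append]
    by_cases h : j = k
    · subst h; simp
    · simp [h, Ne.symm h]
  by_cases hk : k ∈ ks
  · rw [triSum, PySem.Set.ofList_append_singleton,
        PySem.Set.add_of_mem ((PySem.Set.mem_ofList ks k).mpr hk)]
    have hmem : k ∈ PySem.Set.ofList ks := (PySem.Set.mem_ofList ks k).mpr hk
    rw [sum_map_update hmem (PySem.Set.nodup_ofList ks)
        (by intro j _ hne; rw [hcnt j, if_neg hne])]
    have hck : ((ks ++ [k]).count k : Int) = (ks.count k : Int) + 1 := by
      rw [hcnt k, if_pos rfl]; push_cast; ring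
    rw [triSum, hck]
    have harg : ((ks.count k : Int) + 1) * ((ks.count k : Int) + 1 + 1)
        = ((ks.count k : Int) + 1) * ((ks.count k : Int) + 2) := by ring
    rw [harg, tri_succ ((ks.count k : Int))]
    simp only [Nat.add_zero]
    omega
  · rw [triSum, PySem.Set.ofList_append_singleton,
        PySem.Set.add_of_not_mem (fun h => hk ((PySem.Set.mem_ofList ks k).mp h))]
    have hothers : ∀ j ∈ PySem.Set.ofList ks,
        (fun j => PySem.Int.floordiv ((((ks ++ [k]).count j : Int)) * (((ks ++ [k]).count j : Int) + 1)) 2) j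
        = (fun j => PySem.Int.floordiv (((ks.count j : Int)) * (((ks.count j : Int)) + 1)) 2) j := by
      intro j hj
      have hjk : j ≠ k := fun h => hk (h ▸ ((PySem.Set.mem_ofList ks j).mp hj))
      simp only [hcnt j, if_neg hjk, Nat.add_zero]
    rw [List.map_append, List.sum_append, List.map_congr_left hothers]
    have hck : (ks ++ [k]).count k = 1 := by
      rw [hcnt k, if_pos rfl, List.count_eq_zero_of_not_mem hk]
    simp only [List.map_cons, List.map_nil, List.sum_cons, List.sum_nil, hck,
      List.count_eq_zero_of_not_mem hk, triSum]
    norm_num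

-- the plain (exception-free) body of A's loop
def foldA (ks : List Int) (d : PySem.Dict Int Int) (r : Int) : PySem.Dict Int Int × Int :=
  ks.foldl (fun dr k =>
    let d' := dr.1.modify k 0 (· + 1)
    (d', dr.2 + d'.getD k 0)) (d, r)

theorem loop_none (nums : List Int) :
    nums.foldl solveStep none = none := by
  induction nums with
  | nil => rfl
  | cons x xs ih => simpa [solveStep] using ih

theorem loop_some (nums : List Int) : ∀ (d : PySem.Dict Int Int) (r : Int),
    nums.foldl solveStep (some (d, r)) = (nums.mapM pyKey?).map (fun ks => foldA ks d r) := by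
  induction nums with
  | nil => intro d r; simp [foldA]
  | cons x xs ih =>
    intro d r
    cases h : pyKey? x with
    | none => simp [List.foldl_cons, solveStep, h, loop_none, List.mapM_cons]
    | some k =>
      simp only [List.foldl_cons, solveStep, h, Option.bind_some, Option.map_some,
        List.mapM_cons, ih]
      cases hm : xs.mapM pyKey? with
      | none => simp
      | some ks => simp [foldA, List.foldl_cons]

theorem foldA_spec (ks : List Int) :
    foldA ks PySem.Dict.empty 0 = (PySem.Dict.counter ks, triSum ks) := by
  induction ks using List.reverseRecOn with
  | nil =>
    simp [foldA, triSum, PySem.Set.ofList_nil, PySem.Dict.counter_eq_foldl]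
  | append_singleton ks k ih =>
    have hsplit : foldA (ks ++ [k]) PySem.Dict.empty 0
        = (let d' := (foldA ks PySem.Dict.empty 0).1.modify k 0 (· + 1);
           (d', (foldA ks PySem.Dict.empty 0).2 + d'.getD k 0)) := by
      simp [foldA, List.foldl_append]
    rw [hsplit, ih]
    simp only []
    rw [PySem.Dict.getD_modify_self, PySem.Dict.getD_counter,
        ← PySem.Dict.counter_append_singleton, triSum_append]

theorem triSum_eq_B_pass (ks : List Int) :
    (PySem.Dict.counter ks).values.foldl
      (fun res m => res + PySem.Int.floordiv (m * (m + 1)) 2) 0 = triSum ks := by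
  rw [PySem.List.foldl_add _ (fun m => PySem.Int.floordiv (m * (m + 1)) 2)]
  simp [PySem.Dict.values, PySem.Dict.items_counter, List.map_map, triSum, Function.comp_def]

theorem solve_eq_alt (nums : List Int) : solve nums = solve_alt nums := by
  unfold solve solve_alt
  rw [loop_some nums PySem.Dict.empty 0]
  cases h : nums.mapM pyKey? with
  | none => simp
  | some ks =>
    simp only [Option.map_some, foldA_spec]
    rw [triSum_eq_B_pass]

-- ===== VERDICT (by name: the statement is the Claim_ definition above) =====
theorem solve_spec : Claim_equal_solve := by
  intro nums _ _
  unfold Spec_solve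
  exact solve_eq_alt nums
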